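-- pv_equiv track=rewrite | github.com/adilido99/introCompSec | task5/main.py | encrypt_xor_with_changing_key_by_prev_cipher_longer_key
-- ===== SOURCE A (Python) =====
-- def encrypt_xor_with_changing_key_by_prev_cipher(text, key, param):
--     """
--     >>> encrypt_xor_with_changing_key_by_prev_cipher('Hello',123,'encrypt')
--     '3V:V9'
--     >>> encrypt_xor_with_changing_key_by_prev_cipher(encrypt_xor_with_changing_key_by_prev_cipher('Hello',123,'encrypt'),123,'decrypt')
--     'Hello'
--     >>> encrypt_xor_with_changing_key_by_prev_cipher(encrypt_xor_with_changing_key_by_prev_cipher('Cryptography',10,'encrypt'),10,'decrypt')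
--     'Cryptography'
--     """
--     if param == 'encrypt':
--         new_text = ""
--         for i in range(len(text)):
--             new_key = ord(text[i]) ^ key
--             new_text += chr(new_key)
--             key = new_key
--         return new_text
--     else:
--         new_text = ""
--         for i in range(len(text)):
--             new_text += chr(ord(text[i]) ^ key)
--             key = ord(text[i])
--         return new_text
--
-- def create_chunk(text):
--     chunks = []
--     for i in range(4):
--         j = i
--         mini_text = ""
--         while j < len(text):
--             mini_text += text[j]
--             j += 4
--         chunks.append(mini_text)
--     return chunks
--
-- def join_chunk(chunk):
--     text = ""
--     for i in range(len("".join(chunk))):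
--         for j in range(4):
--             if i < len(chunk[j]):
--                 text += chunk[j][i]
--     return text
--
-- def encrypt_xor_with_changing_key_by_prev_cipher_longer_key(text, key_list, param):
--     """
--         >>> key_list = [0x20, 0x44, 0x54, 0x20]
--         >>> encrypt_xor_with_changing_key_by_prev_cipher_longer_key('abcdefg', key_list, 'encrypt')
--         'A&7D$@P'
--         >>> encrypt_xor_with_changing_key_by_prev_cipher_longer_key('aaabbbb', key_list, 'encrypt')
--         'A%5B#GW'
--         >>> encrypt_xor_with_changing_key_by_prev_cipher_longer_key(
--         ...    encrypt_xor_with_changing_key_by_prev_cipher_longer_key('abcdefg',key_list,'encrypt'),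
--         ...        key_list,'decrypt')
--         'abcdefg'
--         >>> encrypt_xor_with_changing_key_by_prev_cipher_longer_key(
--         ...    encrypt_xor_with_changing_key_by_prev_cipher_longer_key('Hellobello, it will work for a long message as well',key_list,'encrypt'),
--         ...        key_list,'decrypt')
--         'Hellobello, it will work for a long message as well'
--     """
--     chunks = create_chunk(text)
--     container_chunk = []
--     if param == "encrypt":
--         for i in range(len(chunks)):
--             container_chunk.append(encrypt_xor_with_changing_key_by_prev_cipher(chunks[i], key_list[i], 'encrypt'))
--         return join_chunk(container_chunk)
--     else:
--         for i in range(len(chunks)):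
--             container_chunk.append(encrypt_xor_with_changing_key_by_prev_cipher(chunks[i], key_list[i], 'decrypt'))
--         return join_chunk(container_chunk)
-- ===== SOURCE B (Python) =====
-- def encrypt_xor_with_changing_key_by_prev_cipher_longer_key(text, key_list, param):
--     # Single pass with a rotating queue of four running keys (no chunking/rejoining).
--     keys = [key_list[0], key_list[1], key_list[2], key_list[3]]
--     out = []
--     if param == 'encrypt':
--         for ch in text:
--             v = ord(ch) ^ keys[0]
--             out.append(chr(v))
--             keys = [keys[1], keys[2], keys[3], v]
--     else:
--         for ch in text:
--             out.append(chr(ord(ch) ^ keys[0]))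
--             keys = [keys[1], keys[2], keys[3], ord(ch)]
--     return ''.join(out)
-- ===== Notes on version B (the rewrite author's own statement) =====
-- stated objective: faster
-- what changed: Drops create_chunk/join_chunk entirely: instead of splitting the text into 4 interleaved chunks, chain-XOR-ciphering each and re-interleaving, B makes one pass over the text with a rotating queue of four running keys.
import Mathlib
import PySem

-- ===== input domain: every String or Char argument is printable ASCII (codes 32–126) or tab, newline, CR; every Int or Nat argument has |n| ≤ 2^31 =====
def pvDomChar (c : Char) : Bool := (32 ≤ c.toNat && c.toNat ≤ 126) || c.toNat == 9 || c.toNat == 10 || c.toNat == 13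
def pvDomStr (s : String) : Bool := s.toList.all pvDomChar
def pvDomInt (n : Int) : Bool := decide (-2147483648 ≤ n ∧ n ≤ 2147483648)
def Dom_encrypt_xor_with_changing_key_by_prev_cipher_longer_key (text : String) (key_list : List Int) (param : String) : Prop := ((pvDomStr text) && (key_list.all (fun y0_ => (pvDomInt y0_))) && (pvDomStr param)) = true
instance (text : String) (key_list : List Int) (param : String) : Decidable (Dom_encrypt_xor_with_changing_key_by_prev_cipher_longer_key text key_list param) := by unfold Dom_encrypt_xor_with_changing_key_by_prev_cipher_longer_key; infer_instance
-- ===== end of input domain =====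

-- B replaces A's chunk/cipher/rejoin pipeline by one linear pass over the text with a rotating
-- queue of four running keys (objective: faster; measured faster in a timing run).


-- ===== PORT A =====
-- ord(c): Int code point
def pyOrd (c : Char) : Int := (c.toNat : Int)
-- chr(n): exact for 0 ≤ n ≤ 0x10FFFF outside the surrogate block (guaranteed by Pre_)
def pyChr (n : Int) : Char := Char.ofNat n.toNat

-- encrypt_xor_with_changing_key_by_prev_cipher, 'encrypt' branch: chained XOR, key := new cipher int
def cipherEnc (key : Int) (s : List Char) : List Char :=
  match s with
  | [] => []
  | c :: rest =>
      let nk := PySem.Int.bxor (pyOrd c) key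
      pyChr nk :: cipherEnc nk rest

-- decrypt branch: key := ord of the processed character
def cipherDec (key : Int) (s : List Char) : List Char :=
  match s with
  | [] => []
  | c :: rest => pyChr (PySem.Int.bxor (pyOrd c) key) :: cipherDec (pyOrd c) rest

def cipher (s : List Char) (key : Int) (param : String) : List Char :=
  if param = "encrypt" then cipherEnc key s else cipherDec key s

-- the inner while loop of create_chunk: text[j], text[j+4], …
def collect (s : List Char) (j : Nat) : List Char :=
  if h : j < s.length then s[j] :: collect s (j + 4) else []
  termination_by s.length - j
  decreasing_by omega

def create_chunk (s : List Char) : List (List Char) :=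
  [collect s 0, collect s 1, collect s 2, collect s 3]

-- join_chunk: for i in range(len("".join(chunk))): for j in range(4): if i < len(chunk[j]): text += chunk[j][i]
-- (getD is exact here: every access is guarded by i < len(chunk[j]), and j < 4 = len(chunk))
def join_chunk (chunk : List (List Char)) : List Char :=
  (List.range chunk.flatten.length).foldl
    (fun acc i =>
      (List.range 4).foldl
        (fun acc2 j =>
          if i < (chunk.getD j []).length then acc2 ++ [(chunk.getD j []).getD i ' '] else acc2)
        acc)
    []

-- key_list[i]: getD is exact under Pre_ (key_list has at least 4 entries)
def encrypt_xor_with_changing_key_by_prev_cipher_longer_key (text : String) (key_list : List Int) (param : String) : String :=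
  let chunks := create_chunk text.toList
  if param = "encrypt" then
    String.ofList (join_chunk ((List.range chunks.length).map
      (fun i => cipher (chunks.getD i []) (key_list.getD i 0) "encrypt")))
  else
    String.ofList (join_chunk ((List.range chunks.length).map
      (fun i => cipher (chunks.getD i []) (key_list.getD i 0) "decrypt")))

-- ===== PORT B =====
-- one pass, rotating queue of four running keys; encrypt: queue gains the cipher int
def goEnc (k0 k1 k2 k3 : Int) (s : List Char) : List Char :=
  match s with
  | [] => []
  | c :: rest =>
      let v := PySem.Int.bxor (pyOrd c) k0
      pyChr v :: goEnc k1 k2 k3 v rest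

-- decrypt: queue gains the plaintext ord
def goDec (k0 k1 k2 k3 : Int) (s : List Char) : List Char :=
  match s with
  | [] => []
  | c :: rest => pyChr (PySem.Int.bxor (pyOrd c) k0) :: goDec k1 k2 k3 (pyOrd c) rest

-- key_list[0..3]: getD is exact under Pre_ (key_list has at least 4 entries)
def encrypt_xor_with_changing_key_by_prev_cipher_longer_key_alt (text : String) (key_list : List Int) (param : String) : String :=
  let k0 := key_list.getD 0 0
  let k1 := key_list.getD 1 0
  let k2 := key_list.getD 2 0
  let k3 := key_list.getD 3 0
  if param = "encrypt" then String.ofList (goEnc k0 k1 k2 k3 text.toList)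
  else String.ofList (goDec k0 k1 k2 k3 text.toList)

-- ===== PRECONDITION & SPEC =====
-- Pre_ excludes: key lists shorter than 4 (Python A raises IndexError), a used key outside
-- 0..0x10FFFF (chr raises ValueError), and used keys in the surrogate block 0xD800..0xDFFF,
-- where A returns a lone-surrogate string that is not representable as a Lean String.
def Pre_encrypt_xor_with_changing_key_by_prev_cipher_longer_key (text : String) (key_list : List Int) (param : String) : Prop :=
  4 ≤ key_list.length ∧
  ∀ i : Nat, i < 4 → i < text.toList.length →
    0 ≤ key_list.getD i 0 ∧ key_list.getD i 0 ≤ 0x10FFFF ∧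
    ¬ (0xD800 ≤ key_list.getD i 0 ∧ key_list.getD i 0 ≤ 0xDFFF)
instance (text : String) (key_list : List Int) (param : String) : Decidable (Pre_encrypt_xor_with_changing_key_by_prev_cipher_longer_key text key_list param) := by
  unfold Pre_encrypt_xor_with_changing_key_by_prev_cipher_longer_key; infer_instance

def pvWitness_encrypt_xor_with_changing_key_by_prev_cipher_longer_key : String × List Int × String :=
  ("abcdefg", [32, 68, 84, 32], "encrypt")

def Spec_encrypt_xor_with_changing_key_by_prev_cipher_longer_key (text : String) (key_list : List Int) (param : String) (out : String) : Prop := out = encrypt_xor_with_changing_key_by_prev_cipher_longer_key_alt text key_list param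
instance (text : String) (key_list : List Int) (param : String) (out : String) : Decidable (Spec_encrypt_xor_with_changing_key_by_prev_cipher_longer_key text key_list param out) := by unfold Spec_encrypt_xor_with_changing_key_by_prev_cipher_longer_key; infer_instance

-- ===== CLAIM (what is proved, stated in full; the proofs are below) =====
def Claim_equal_encrypt_xor_with_changing_key_by_prev_cipher_longer_key : Prop := ∀ (text : String) (key_list : List Int) (param : String), Dom_encrypt_xor_with_changing_key_by_prev_cipher_longer_key text key_list param → Pre_encrypt_xor_with_changing_key_by_prev_cipher_longer_key text key_list param → Spec_encrypt_xor_with_changing_key_by_prev_cipher_longer_key text key_list param (encrypt_xor_with_changing_key_by_prev_cipher_longer_key text key_list param)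

-- ===== LEMMAS AND PROOFS =====

-- every fourth element of L starting at its head
def ev : List Char → List Char
  | [] => []
  | [a] => [a]
  | [a, _] => [a]
  | [a, _, _] => [a]
  | a :: _ :: _ :: _ :: r => a :: ev r

lemma ev_cons (c : Char) (r : List Char) : ev (c :: r) = c :: ev (r.drop 3) := by
  match r with
  | [] => rfl
  | [_] => rfl
  | [_, _] => rfl
  | _ :: _ :: _ :: _ => rfl

-- round-robin interleaving of four streams (rotating, one element at a time)
def interleave (a b c d : List Char) : List Char :=
  match a with
  | [] => []
  | x :: xs => x :: interleave b c d xs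
  termination_by a.length + b.length + c.length + d.length
  decreasing_by simp; omega

lemma len_cipherEnc (k : Int) (L : List Char) : (cipherEnc k L).length = L.length := by
  induction L generalizing k with
  | nil => simp [cipherEnc]
  | cons c r ih => simp [cipherEnc, ih]

lemma len_cipherDec (k : Int) (L : List Char) : (cipherDec k L).length = L.length := by
  induction L generalizing k with
  | nil => simp [cipherDec]
  | cons c r ih => simp [cipherDec, ih]

lemma len_ev (L : List Char) : (ev L).length = (L.length + 3) / 4 := by
  induction L using ev.induct with
  | case1 => simp [ev]
  | case2 a => simp [ev]
  | case3 a b => simp [ev]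
  | case4 a b c => simp [ev]
  | case5 a b c d r ih =>
      simp only [ev, List.length_cons, ih]
      omega

lemma collect_eq (L : List Char) (j : Nat) : collect L j = ev (L.drop j) := by
  by_cases h : j < L.length
  · rw [collect, dif_pos h, collect_eq L (j + 4), List.drop_eq_getElem_cons h, ev_cons]
    simp [List.drop_drop]
  · rw [collect, dif_neg h, List.drop_of_length_le (by omega)]
    rfl
  termination_by L.length - j
  decreasing_by omega

lemma goEnc_eq (L : List Char) (k0 k1 k2 k3 : Int) :
    goEnc k0 k1 k2 k3 L =
      interleave (cipherEnc k0 (ev L)) (cipherEnc k1 (ev (L.drop 1)))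
        (cipherEnc k2 (ev (L.drop 2))) (cipherEnc k3 (ev (L.drop 3))) := by
  induction L generalizing k0 k1 k2 k3 with
  | nil => simp [goEnc, ev, cipherEnc, interleave]
  | cons c r ih =>
      show goEnc k0 k1 k2 k3 (c :: r) =
        interleave (cipherEnc k0 (ev (c :: r))) (cipherEnc k1 (ev r))
          (cipherEnc k2 (ev (r.drop 1))) (cipherEnc k3 (ev (r.drop 2)))
      rw [goEnc, ev_cons, cipherEnc, interleave, ih]

lemma goDec_eq (L : List Char) (k0 k1 k2 k3 : Int) :
    goDec k0 k1 k2 k3 L =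
      interleave (cipherDec k0 (ev L)) (cipherDec k1 (ev (L.drop 1)))
        (cipherDec k2 (ev (L.drop 2))) (cipherDec k3 (ev (L.drop 3))) := by
  induction L generalizing k0 k1 k2 k3 with
  | nil => simp [goDec, ev, cipherDec, interleave]
  | cons c r ih =>
      show goDec k0 k1 k2 k3 (c :: r) =
        interleave (cipherDec k0 (ev (c :: r))) (cipherDec k1 (ev r))
          (cipherDec k2 (ev (r.drop 1))) (cipherDec k3 (ev (r.drop 2)))
      rw [goDec, ev_cons, cipherDec, interleave, ih]

-- one output row of join_chunk
def row4 (w x y z : List Char) (i : Nat) : List Char :=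
  (if i < w.length then [w.getD i ' '] else []) ++ (if i < x.length then [x.getD i ' '] else []) ++
  (if i < y.length then [y.getD i ' '] else []) ++ (if i < z.length then [z.getD i ' '] else [])

lemma flat4 (w : List Char) : ∀ (x y z : List Char) (n : Nat),
    x.length ≤ w.length → y.length ≤ x.length → z.length ≤ y.length → w.length ≤ z.length + 1 →
    w.length ≤ n →
    (List.range n).flatMap (row4 w x y z) = interleave w x y z := by
  induction w with
  | nil =>
      intro x y z n h1 h2 h3 h4 h5
      have hx : x = [] := List.length_eq_zero_iff.mp (by simp only [List.length_nil] at h1; omega)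
      subst hx
      have hy : y = [] := List.length_eq_zero_iff.mp (by simp only [List.length_nil] at h2; omega)
      subst hy
      have hz : z = [] := List.length_eq_zero_iff.mp (by simp only [List.length_nil] at h3; omega)
      subst hz
      simp [interleave, row4]
  | cons a as ih =>
      intro x y z n h1 h2 h3 h4 h5
      obtain ⟨m, rfl⟩ : ∃ m, n = m + 1 := ⟨n - 1, by simp only [List.length_cons] at h5; omega⟩
      rw [List.range_succ_eq_map, List.flatMap_cons, List.flatMap_map]
      have hrow : ∀ (i : Nat), row4 (a :: as) x y z (Nat.succ i) =
          row4 as (x.drop 1) (y.drop 1) (z.drop 1) i := by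
        intro i
        cases x <;> cases y <;> cases z <;>
          simp [row4]
      rw [List.flatMap_congr (fun i _ => hrow i)]
      simp only [List.length_cons] at h4 h5
      cases x with
      | nil =>
          have hy : y = [] := List.length_eq_zero_iff.mp (by simp only [List.length_nil] at h2; omega)
          subst hy
          have hz : z = [] := List.length_eq_zero_iff.mp (by simp only [List.length_nil] at h3; omega)
          subst hz
          have has : as = [] := List.length_eq_zero_iff.mp (by simp only [List.length_nil] at h4; omega)
          subst has
          simp only [List.drop_nil]
          rw [ih [] [] [] m (by simp) (by simp) (by simp) (by simp) (by simp)]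
          simp [row4, interleave]
      | cons b bs =>
        simp only [List.length_cons] at h1
        cases y with
        | nil =>
            have hz : z = [] := List.length_eq_zero_iff.mp (by simp only [List.length_nil] at h3; omega)
            subst hz
            have has : as = [] := List.length_eq_zero_iff.mp (by simp only [List.length_nil] at h4; omega)
            subst has
            have hbs : bs = [] := List.length_eq_zero_iff.mp (by
              have h1' := h1; simp only [List.length_nil] at h1'; omega)
            subst hbs
            simp only [List.drop_succ_cons, List.drop_nil]
            rw [ih [] [] [] m (by simp) (by simp) (by simp) (by simp) (by simp)]
            simp [row4, interleave]
        | cons c cs =>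
          simp only [List.length_cons] at h2
          cases z with
          | nil =>
              have has : as = [] := List.length_eq_zero_iff.mp (by simp only [List.length_nil] at h4; omega)
              subst has
              have hbs : bs = [] := List.length_eq_zero_iff.mp (by
                have h1' := h1; simp only [List.length_nil] at h1'; omega)
              subst hbs
              have hcs : cs = [] := List.length_eq_zero_iff.mp (by
                have h2' := h2; simp only [List.length_nil] at h2'; omega)
              subst hcs
              simp only [List.drop_succ_cons, List.drop_nil]
              rw [ih [] [] [] m (by simp) (by simp) (by simp) (by simp) (by simp)]
              simp [row4, interleave]
          | cons d ds =>
              simp only [List.length_cons] at h3 h4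
              simp only [List.drop_succ_cons, List.drop_zero]
              rw [ih bs cs ds m (by omega) (by omega) (by omega) (by omega) (by omega)]
              simp [row4, interleave]

lemma join_chunk_eq (w x y z : List Char)
    (h1 : x.length ≤ w.length) (h2 : y.length ≤ x.length) (h3 : z.length ≤ y.length)
    (h4 : w.length ≤ z.length + 1) :
    join_chunk [w, x, y, z] = interleave w x y z := by
  unfold join_chunk
  have hinner : ∀ (acc : List Char) (i : Nat),
      (List.range 4).foldl
        (fun acc2 j =>
          if i < (([w, x, y, z] : List (List Char)).getD j []).length then
            acc2 ++ [(([w, x, y, z] : List (List Char)).getD j []).getD i ' '] else acc2)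
        acc = acc ++ row4 w x y z i := by
    intro acc i
    show (List.foldl _ acc [0, 1, 2, 3]) = _
    simp only [List.foldl_cons, List.foldl_nil, List.getD]
    simp [row4]
    split_ifs <;> simp
  rw [PySem.List.foldl_congr_mem (List.range ([w, x, y, z] : List (List Char)).flatten.length)
    (fun acc i =>
      (List.range 4).foldl
        (fun acc2 j =>
          if i < (([w, x, y, z] : List (List Char)).getD j []).length then
            acc2 ++ [(([w, x, y, z] : List (List Char)).getD j []).getD i ' '] else acc2)
        acc)
    (fun acc i => acc ++ row4 w x y z i)
    []
    (fun acc i _ => hinner acc i)]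
  rw [PySem.List.foldl_append_eq_flatMap]
  simp only [List.nil_append]
  exact flat4 w x y z _ h1 h2 h3 h4 (by simp)

-- ===== VERDICT (by name: the statement is the Claim_ definition above) =====
theorem encrypt_xor_with_changing_key_by_prev_cipher_longer_key_spec : Claim_equal_encrypt_xor_with_changing_key_by_prev_cipher_longer_key := by
  intro text key_list param _ _
  unfold Spec_encrypt_xor_with_changing_key_by_prev_cipher_longer_key
  unfold encrypt_xor_with_changing_key_by_prev_cipher_longer_key
    encrypt_xor_with_changing_key_by_prev_cipher_longer_key_alt
  have hne : ¬ (("decrypt" : String) = "encrypt") := by decide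
  by_cases hp : param = "encrypt"
  all_goals
    simp only [hp, create_chunk, List.length_cons, List.length_nil, reduceIte]
    rw [show List.range (3 + 1) = [0, 1, 2, 3] from rfl]
    simp only [List.map_cons, List.map_nil, List.getD, List.getElem?_cons_zero,
      List.getElem?_cons_succ, Option.getD_some, cipher, reduceIte, if_neg hne]
    simp only [collect_eq, List.drop_zero]
  · rw [goEnc_eq,
      join_chunk_eq _ _ _ _
        (by rw [len_cipherEnc, len_cipherEnc, len_ev, len_ev]; simp only [List.length_drop]; omega)
        (by rw [len_cipherEnc, len_cipherEnc, len_ev, len_ev]; simp only [List.length_drop]; omega)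
        (by rw [len_cipherEnc, len_cipherEnc, len_ev, len_ev]; simp only [List.length_drop]; omega)
        (by rw [len_cipherEnc, len_cipherEnc, len_ev, len_ev]; simp only [List.length_drop]; omega)]
  · rw [goDec_eq,
      join_chunk_eq _ _ _ _
        (by rw [len_cipherDec, len_cipherDec, len_ev, len_ev]; simp only [List.length_drop]; omega)
        (by rw [len_cipherDec, len_cipherDec, len_ev, len_ev]; simp only [List.length_drop]; omega)
        (by rw [len_cipherDec, len_cipherDec, len_ev, len_ev]; simp only [List.length_drop]; omega)
        (by rw [len_cipherDec, len_cipherDec, len_ev, len_ev]; simp only [List.length_drop]; omega)]
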